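-- pv_equiv track=rewrite | github.com/hoangduy0308/C-Vul-Devign | devign_pipeline/src/tokenization/optimized_tokenizer.py | _looks_like_type_cast
-- ===== SOURCE A (Python) =====
-- from typing import List, Dict, Tuple, Optional, Set
--
-- def _looks_like_type_cast(tokens: List[str]) -> bool:
--     """Check if previous tokens look like a type cast before unary minus."""
--     if len(tokens) < 2 or tokens[-1] != ')':
--         return False
--
--     typeish_keywords = {
--         # C primitive types
--         'void', 'char', 'short', 'int', 'long', 'signed', 'unsigned',
--         'float', 'double',
--         # Fixed-width integer types
--         'uint8_t', 'uint16_t', 'uint32_t', 'uint64_t',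
--         'int8_t', 'int16_t', 'int32_t', 'int64_t',
--         # Size/pointer types
--         'size_t', 'ssize_t', 'ptrdiff_t', 'intptr_t', 'uintptr_t',
--         # POSIX types
--         'off_t', 'time_t', 'pid_t', 'uid_t', 'gid_t',
--         'socklen_t', 'mode_t', 'dev_t', 'ino_t', 'nlink_t',
--         'blksize_t', 'blkcnt_t', 'clock_t', 'useconds_t', 'suseconds_t',
--     }
--
--     # Find matching open paren
--     depth = 1
--     for i in range(len(tokens) - 2, max(0, len(tokens) - 10) - 1, -1):
--         if tokens[i] == ')':
--             depth += 1
--         elif tokens[i] == '(':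
--             depth -= 1
--             if depth == 0:
--                 # Check inside for type-like tokens
--                 inside = tokens[i+1:-1]
--                 for tok in inside:
--                     if tok in typeish_keywords or tok.endswith('_t'):
--                         return True
--                 break
--     return False
-- ===== SOURCE B (Python) =====
-- from typing import List
--
-- def _looks_like_type_cast(tokens: List[str]) -> bool:
--     """Check if previous tokens look like a type cast before unary minus."""
--     if len(tokens) < 2 or tokens[-1] != ')':
--         return False
--
--     typeish_keywords = {
--         'void', 'char', 'short', 'int', 'long', 'signed', 'unsigned',
--         'float', 'double',
--         'uint8_t', 'uint16_t', 'uint32_t', 'uint64_t',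
--         'int8_t', 'int16_t', 'int32_t', 'int64_t',
--         'size_t', 'ssize_t', 'ptrdiff_t', 'intptr_t', 'uintptr_t',
--         'off_t', 'time_t', 'pid_t', 'uid_t', 'gid_t',
--         'socklen_t', 'mode_t', 'dev_t', 'ino_t', 'nlink_t',
--         'blksize_t', 'blkcnt_t', 'clock_t', 'useconds_t', 'suseconds_t',
--     }
--
--     # Forward scan of the same 10-token window, keeping a stack of '(' indices.
--     start = max(0, len(tokens) - 10)
--     stack = []
--     for i in range(start, len(tokens) - 1):
--         t = tokens[i]
--         if t == '(':
--             stack.append(i)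
--         elif t == ')':
--             if stack:
--                 stack.pop()
--     if not stack:
--         return False
--     m = stack[-1]  # matching '(' of the final ')'
--     inside = tokens[m + 1:-1]
--     return any(tok in typeish_keywords or tok.endswith('_t') for tok in inside)
-- ===== Notes on version B (the rewrite author's own statement) =====
-- stated objective: alternative
-- what changed: Replaces A's backward depth-counter scan over the 10-token window with a forward scan that keeps an explicit stack of '(' indices (pop on ')'); the matching open paren of the final ')' is the stack top, then the same inside-slice is tested for type-like tokens.
import Mathlib
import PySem

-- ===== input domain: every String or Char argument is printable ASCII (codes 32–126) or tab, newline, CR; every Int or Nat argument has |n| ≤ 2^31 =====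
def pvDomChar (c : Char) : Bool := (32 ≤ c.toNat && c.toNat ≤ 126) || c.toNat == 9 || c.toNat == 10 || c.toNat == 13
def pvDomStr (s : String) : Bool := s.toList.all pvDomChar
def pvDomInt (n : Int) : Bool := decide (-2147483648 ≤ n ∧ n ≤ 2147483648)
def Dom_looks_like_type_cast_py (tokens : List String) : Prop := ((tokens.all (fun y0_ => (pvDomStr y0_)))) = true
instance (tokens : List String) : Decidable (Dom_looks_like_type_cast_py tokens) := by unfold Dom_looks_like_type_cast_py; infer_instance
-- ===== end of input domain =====

-- B replaces A's backward depth-counter scan of the 10-token window with a forward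
-- stack-based paren match over the same window (alternative decomposition, same cost).

-- shared literal data: the typeish_keywords set literal, identical in both Pythons
def pvTypeKeywords : List String :=
  ["void", "char", "short", "int", "long", "signed", "unsigned",
   "float", "double",
   "uint8_t", "uint16_t", "uint32_t", "uint64_t",
   "int8_t", "int16_t", "int32_t", "int64_t",
   "size_t", "ssize_t", "ptrdiff_t", "intptr_t", "uintptr_t",
   "off_t", "time_t", "pid_t", "uid_t", "gid_t",
   "socklen_t", "mode_t", "dev_t", "ino_t", "nlink_t",
   "blksize_t", "blkcnt_t", "clock_t", "useconds_t", "suseconds_t"]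

-- 'tok in typeish_keywords or tok.endswith("_t")'
def pvTypeish (tok : String) : Bool :=
  pvTypeKeywords.contains tok || PySem.Str.endswith tok "_t"

-- ===== PORT A =====
-- A's inner 'for tok in inside: if …: return True' then break → False
def pvAInner : List String → Bool
  | [] => false
  | tok :: rest => if pvTypeish tok then true else pvAInner rest

-- A's backward loop over the index range, carrying the depth counter.
-- Indices produced by the range are always in bounds, so pyGetD with default "" is exact.
def pvALoop (tokens : List String) (depth : Int) : List Int → Bool
  | [] => false
  | i :: rest =>
    let t := PySem.List.pyGetD tokens i ""
    if t = ")" then pvALoop tokens (depth + 1) rest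
    else if t = "(" then
      if depth - 1 = 0 then
        pvAInner (PySem.List.slice tokens (some (i + 1)) (some (-1)))
      else pvALoop tokens (depth - 1) rest
    else pvALoop tokens depth rest

def looks_like_type_cast_py (tokens : List String) : Bool :=
  let n : Int := tokens.length
  if n < 2 || PySem.List.pyGetD tokens (-1) "" ≠ ")" then false
  else pvALoop tokens 1 (PySem.List.pyRange (n - 2) (max 0 (n - 10) - 1) (-1))

-- ===== PORT B =====
-- one forward step of B's stack loop: push '(' indices, pop (if nonempty) on ')'
def pvBStep (tokens : List String) (stack : List Int) (i : Int) : List Int :=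
  let t := PySem.List.pyGetD tokens i ""
  if t = "(" then i :: stack
  else if t = ")" then stack.tail
  else stack

def looks_like_type_cast_py_alt (tokens : List String) : Bool :=
  let n : Int := tokens.length
  if n < 2 || PySem.List.pyGetD tokens (-1) "" ≠ ")" then false
  else
    let stack := (PySem.List.pyRange (max 0 (n - 10)) (n - 1) 1).foldl (pvBStep tokens) []
    match stack with
    | [] => false
    | m :: _ => (PySem.List.slice tokens (some (m + 1)) (some (-1))).any pvTypeish

-- ===== PRECONDITION & SPEC =====
def Spec_looks_like_type_cast_py (tokens : List String) (out : Bool) : Prop := out = looks_like_type_cast_py_alt tokens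
instance (tokens : List String) (out : Bool) : Decidable (Spec_looks_like_type_cast_py tokens out) := by unfold Spec_looks_like_type_cast_py; infer_instance

-- ===== CLAIM (what is proved, stated in full; the proofs are below) =====
def Claim_equal_looks_like_type_cast_py : Prop := ∀ (tokens : List String), Dom_looks_like_type_cast_py tokens → Spec_looks_like_type_cast_py tokens (looks_like_type_cast_py tokens)

-- ===== LEMMAS AND PROOFS =====

lemma pvAInner_eq_any (l : List String) : pvAInner l = l.any pvTypeish := by
  induction l with
  | nil => rfl
  | cons tok rest ih => simp [pvAInner, ih]

-- key invariant: the backward depth-(d+1) scan of idxs.reverse answers according to the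
-- d-th element (from the top) of the stack the forward scan of idxs leaves behind
lemma pvKey (tokens : List String) (idxs : List Int) (d : Nat) :
    pvALoop tokens ((d : Int) + 1) idxs.reverse =
      match (idxs.foldl (pvBStep tokens) [])[d]? with
      | some m => pvAInner (PySem.List.slice tokens (some (m + 1)) (some (-1)))
      | none => false := by
  induction idxs using List.reverseRecOn generalizing d with
  | nil => simp [pvALoop]
  | append_singleton idxs x ih =>
    rw [List.reverse_append]
    simp only [List.reverse_singleton, List.singleton_append, List.foldl_append,
      List.foldl_cons, List.foldl_nil, pvALoop, pvBStep]
    by_cases h1 : PySem.List.pyGetD tokens x "" = ")"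
    · rw [if_pos h1, if_neg (by simp [h1]), if_pos h1]
      have e1 : ((d : Int) + 1) + 1 = ((d + 1 : Nat) : Int) + 1 := by push_cast; ring
      rw [e1, ih (d + 1)]
      simp [List.getElem?_tail]
    · by_cases h2 : PySem.List.pyGetD tokens x "" = "("
      · rw [if_neg h1, if_pos h2, if_pos h2]
        cases d with
        | zero => norm_num
        | succ d' =>
          rw [if_neg (by push_cast; omega)]
          have e1 : ((d' + 1 : Nat) : Int) + 1 - 1 = ((d' : Nat) : Int) + 1 := by push_cast; ring
          rw [e1, ih d']
          simp
      · rw [if_neg h1, if_neg h2, if_neg h2, if_neg h1]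
        exact ih d

-- ===== VERDICT (by name: the statement is the Claim_ definition above) =====
theorem looks_like_type_cast_py_spec : Claim_equal_looks_like_type_cast_py := by
  intro tokens _
  unfold Spec_looks_like_type_cast_py looks_like_type_cast_py looks_like_type_cast_py_alt
  simp only []
  set n : Int := (tokens.length : Int) with hn
  by_cases hg : (decide (n < 2) || decide (PySem.List.pyGetD tokens (-1) "" ≠ ")")) = true
  · rw [if_pos hg, if_pos hg]
  · rw [if_neg hg, if_neg hg]
    have hrange : PySem.List.pyRange (n - 2) (max 0 (n - 10) - 1) (-1)
        = (PySem.List.pyRange (max 0 (n - 10)) (n - 1) 1).reverse := by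
      rw [PySem.List.pyRange_neg_one_eq_reverse, show max 0 (n - 10) - 1 + 1 = max 0 (n - 10) from by ring,
        show n - 2 + 1 = n - 1 from by ring]
    rw [hrange]
    have hk := pvKey tokens (PySem.List.pyRange (max 0 (n - 10)) (n - 1) 1) 0
    simp only [Nat.cast_zero, zero_add] at hk
    rw [hk]
    cases (PySem.List.pyRange (max 0 (n - 10)) (n - 1) 1).foldl (pvBStep tokens) [] with
    | nil => simp
    | cons m rest => simp [pvAInner_eq_any]
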